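-- pv_equiv track=rewrite | github.com/Abdul-Muneeb-git/Code-forces | string(reduce length).py | minimize_string_length
-- ===== SOURCE A (Python) =====
-- def minimize_string_length(s):
--     s = list(s)  # Convert string to list for easier manipulation
--     i = 0
--     while i < len(s) - 1:
--         if s[i] == s[i + 1]:
--             # Perform the operation: replace s[i] and remove s[i+1]
--             s[i] = 'a'  # Replace with any character (e.g., 'a')
--             s.pop(i + 1)  # Remove the next character
--             # Reset i to 0 to recheck the string from the beginning
--             i = 0
--         else:
--             i += 1
--     return len(s)
-- ===== SOURCE B (Python) =====
-- def minimize_string_length(s):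
--     # Single left-to-right stack pass: merge an equal top with the incoming
--     # char into 'a' (repeatedly), instead of A's restart-from-zero rescans.
--     stack = []
--     for c in s:
--         while stack and stack[-1] == c:
--             stack.pop()
--             c = 'a'
--         stack.append(c)
--     return len(stack)
-- ===== Notes on version B (the rewrite author's own statement) =====
-- stated objective: faster
-- what changed: Replaced A's mutate-and-restart-from-index-0 while loop (quadratic rescans) by a single left-to-right stack pass that repeatedly merges an equal stack top with the incoming character into 'a'.
import Mathlib
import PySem

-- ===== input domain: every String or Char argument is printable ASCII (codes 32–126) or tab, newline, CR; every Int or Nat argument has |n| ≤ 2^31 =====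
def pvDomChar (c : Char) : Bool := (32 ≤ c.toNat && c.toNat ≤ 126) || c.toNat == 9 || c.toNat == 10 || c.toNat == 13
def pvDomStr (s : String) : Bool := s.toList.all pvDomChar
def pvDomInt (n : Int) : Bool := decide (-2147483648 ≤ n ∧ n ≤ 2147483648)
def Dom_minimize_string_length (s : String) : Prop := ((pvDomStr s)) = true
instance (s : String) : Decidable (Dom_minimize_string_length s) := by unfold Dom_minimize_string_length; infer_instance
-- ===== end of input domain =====

-- B replaces A's restart-from-zero rescanning while loop by a single
-- left-to-right stack pass merging an equal top with the incoming char into 'a'.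

-- ===== PORT A =====
-- A's while loop: state = (current list, index i); on an equal adjacent pair,
-- set s[i] := 'a', pop s[i+1] and restart at i = 0, else advance i.
def pvLoopA (s : List Char) (i : Nat) : Nat :=
  if h : i < s.length - 1 then
    have hi : i < s.length := by omega
    have hi1 : i + 1 < s.length := by omega
    if s[i] = s[i + 1] then
      pvLoopA ((s.set i 'a').eraseIdx (i + 1)) 0
    else
      pvLoopA s (i + 1)
  else s.length
termination_by (s.length, s.length - i)
decreasing_by
  · apply Prod.Lex.left
    have : i + 1 < (s.set i 'a').length := by simpa using hi1
    rw [List.length_eraseIdx, if_pos this]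
    simp; omega
  · apply Prod.Lex.right
    omega

def minimize_string_length (s : String) : Int := (pvLoopA s.toList 0 : Int)

-- ===== PORT B =====
-- Source B's inner while loop: while stack nonempty and top = c, pop and set c := 'a';
-- then push c. The stack is a List Char with head = top.
def pvPush (st : List Char) (c : Char) : List Char :=
  match st with
  | [] => [c]
  | t :: rest => if t = c then pvPush rest 'a' else c :: t :: rest

def minimize_string_length_alt (s : String) : Int :=
  ((s.toList.foldl pvPush []).length : Int)

-- ===== PRECONDITION & SPEC =====
def Spec_minimize_string_length (s : String) (out : Int) : Prop := out = minimize_string_length_alt s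
instance (s : String) (out : Int) : Decidable (Spec_minimize_string_length s out) := by unfold Spec_minimize_string_length; infer_instance

-- ===== CLAIM (what is proved, stated in full; the proofs are below) =====
def Claim_equal_minimize_string_length : Prop := ∀ (s : String), Dom_minimize_string_length s → Spec_minimize_string_length s (minimize_string_length s)

-- ===== LEMMAS AND PROOFS =====

-- Processing a list with no equal adjacent pair never merges: the stack is its reverse.
lemma pvFold_of_chain (p : List Char) (h : List.IsChain (· ≠ ·) p) :
    p.foldl pvPush [] = p.reverse := by
  induction p using List.reverseRecOn with
  | nil => rfl
  | append_singleton q c ih =>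
    rcases List.isChain_append.1 h with ⟨hq, -, hlast⟩
    rw [List.foldl_append, ih hq]
    simp only [List.foldl_cons, List.foldl_nil, List.reverse_append, List.reverse_singleton,
      List.singleton_append]
    cases hq' : q.reverse with
    | nil => simp [pvPush]
    | cons t rest =>
      have ht : q.getLast? = some t := by
        rw [← List.head?_reverse, hq']; rfl
      have : t ≠ c := hlast t ht c rfl
      simp [pvPush, this]

lemma chain_take_one (l : List Char) : List.IsChain (· ≠ ·) (l.take 1) := by
  cases l with
  | nil => exact List.IsChain.nil
  | cons x t => simpa using List.isChain_singleton x

-- One merge step of A does not change the final stack of B's pass.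
lemma pvFold_merge (p t : List Char) (c : Char) (h : List.IsChain (· ≠ ·) (p ++ [c])) :
    (p ++ c :: c :: t).foldl pvPush [] = (p ++ 'a' :: t).foldl pvPush [] := by
  rcases List.isChain_append.1 h with ⟨hp, -, hlast⟩
  have hrev : p.foldl pvPush [] = p.reverse := pvFold_of_chain p hp
  have hpush : pvPush p.reverse c = c :: p.reverse := by
    cases hq' : p.reverse with
    | nil => simp [pvPush]
    | cons x rest =>
      have hx : p.getLast? = some x := by
        rw [← List.head?_reverse, hq']; rfl
      have : x ≠ c := hlast x hx c rfl
      simp [pvPush, this]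
  rw [List.foldl_append, List.foldl_append, hrev]
  simp only [List.foldl_cons, hpush]
  simp [pvPush]

-- list surgery for A's in-place update: set index |p| then pop index |p|+1
lemma surgery (p t : List Char) (c d a : Char) :
    ((p ++ c :: d :: t).set p.length a).eraseIdx (p.length + 1) = p ++ a :: t := by
  induction p with
  | nil => simp
  | cons y q ih => simpa using ih

-- Main invariant: if the scanned prefix (through index i) has no equal adjacent
-- pair, A's loop returns the length of B's final stack.
lemma pvLoopA_eq (s : List Char) (i : Nat)
    (h : List.IsChain (· ≠ ·) (s.take (i + 1))) :
    pvLoopA s i = (s.foldl pvPush []).length := by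
  induction s, i using pvLoopA.induct with
  | case1 s i hlt hi hi1 heq ih =>
    -- merge step
    have hlen : (s.take i).length = i := List.length_take_of_le (by omega)
    have hsplit : s = s.take i ++ s[i] :: s[i] :: s.drop (i + 2) := by
      have h0 : s = s.take i ++ s[i] :: s[i + 1] :: s.drop (i + 2) := by
        conv_lhs => rw [← List.take_append_drop i s]
        rw [List.drop_eq_getElem_cons hi, List.drop_eq_getElem_cons hi1]
      rw [← heq] at h0; exact h0
    have htake1 : s.take (i + 1) = s.take i ++ [s[i]] := by
      rw [List.take_succ, List.getElem?_eq_getElem hi]; rfl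
    have hset : (s.set i 'a').eraseIdx (i + 1) = s.take i ++ 'a' :: s.drop (i + 2) := by
      conv_lhs => rw [hsplit]
      simpa [hlen] using surgery (s.take i) (s.drop (i + 2)) s[i] s[i] 'a'
    rw [pvLoopA, dif_pos hlt, if_pos heq]
    rw [ih (by rw [hset]; exact chain_take_one _), hset]
    have hm : (s.take i ++ s[i] :: s[i] :: s.drop (i + 2)).foldl pvPush []
            = (s.take i ++ 'a' :: s.drop (i + 2)).foldl pvPush [] := by
      apply pvFold_merge
      rw [← htake1]; exact h
    conv_rhs => rw [hsplit]
    rw [hm]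
  | case2 s i hlt hi hi1 hne ih =>
    -- advance step
    rw [pvLoopA, dif_pos hlt, if_neg hne]
    apply ih
    have htake2 : s.take (i + 2) = s.take (i + 1) ++ [s[i + 1]] := by
      rw [List.take_succ, List.getElem?_eq_getElem hi1]; rfl
    have htake1 : s.take (i + 1) = s.take i ++ [s[i]] := by
      rw [List.take_succ, List.getElem?_eq_getElem hi]; rfl
    rw [htake2]
    refine List.IsChain.append h (by simpa using List.isChain_singleton _) ?_
    intro x hx y hy
    rw [htake1, List.getLast?_append, List.getLast?_singleton] at hx
    simp at hx hy
    subst hx; subst hy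
    exact hne
  | case3 s i hge =>
    -- loop exit: the whole list has no equal adjacent pair
    have hall : s.take (i + 1) = s := List.take_of_length_le (by omega)
    rw [hall] at h
    rw [pvLoopA, dif_neg hge]
    rw [pvFold_of_chain s h, List.length_reverse]

-- ===== VERDICT (by name: the statement is the Claim_ definition above) =====
theorem minimize_string_length_spec : Claim_equal_minimize_string_length := by
  intro s _
  unfold Spec_minimize_string_length minimize_string_length minimize_string_length_alt
  rw [pvLoopA_eq s.toList 0 (chain_take_one _)]
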